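-- pv_equiv track=rewrite | github.com/canolmezoglu/DyNetiKAT | src/python/maude_parser.py | remove_unnecessary_parentheses_v11
-- ===== SOURCE A (Python) =====
-- def remove_unnecessary_parentheses_v11(text):
--     result = []
--     close_parentheses_to_remove = 0
--
--     for i in reversed(range(len(text))):
--         char = text[i]
--
--         if char == ')':
--             if close_parentheses_to_remove > 0:
--                 close_parentheses_to_remove -= 1
--             else:
--                 result.append(char)
--         elif char == '(':
--             if i < len(text) - 1 and text[i + 1] == ')':
--                 close_parentheses_to_remove += 1
--             else:
--                 result.append(char)
--         else:
--             result.append(char)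
--
--     return ''.join(reversed(result)).strip()
-- ===== SOURCE B (Python) =====
-- def remove_unnecessary_parentheses_v11(text):
--     # Forward scan over a stack of text chunks separated by pending close-parens;
--     # a qualifying open-paren deletes the nearest pending close-paren to its left
--     # by merging the top two chunks.
--     segs = [[]]
--     n = len(text)
--     for i, c in enumerate(text):
--         if c == ')':
--             segs.append([])
--         elif c == '(' and i + 1 < n and text[i + 1] == ')':
--             if len(segs) > 1:
--                 top = segs.pop()
--                 segs[-1].extend(top)
--         else:
--             segs[-1].append(c)
--     return ')'.join(''.join(s) for s in segs).strip()
-- ===== Notes on version B (the rewrite author's own statement) =====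
-- stated objective: alternative
-- what changed: Replaces A's right-to-left scan with a deferred close-paren-removal counter and a final reverse by a single forward scan over a stack of text chunks, where a qualifying open-paren deletes the nearest pending close-paren by merging the top two chunks.
import Mathlib
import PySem

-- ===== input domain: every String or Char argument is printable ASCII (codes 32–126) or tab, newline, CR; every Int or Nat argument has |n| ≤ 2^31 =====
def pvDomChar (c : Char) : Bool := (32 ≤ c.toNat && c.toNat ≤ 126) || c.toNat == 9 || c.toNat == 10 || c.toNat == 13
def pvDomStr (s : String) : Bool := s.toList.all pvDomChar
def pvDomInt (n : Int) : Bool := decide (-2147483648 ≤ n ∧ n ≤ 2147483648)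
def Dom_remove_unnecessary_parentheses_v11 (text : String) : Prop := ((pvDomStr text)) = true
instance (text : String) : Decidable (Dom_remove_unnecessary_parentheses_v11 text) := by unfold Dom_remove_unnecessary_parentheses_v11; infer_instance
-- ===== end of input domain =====

-- B replaces A's reverse scan with a deferred-removal counter by a forward scan over a
-- stack of text chunks; objective: alternative decomposition, same cost.

-- ===== PORT A =====
-- A's reverse loop: structural recursion from the right; the pair is
-- (characters kept, in final order; pending close-parentheses-to-remove counter).
def pvRevGo : List Char → List Char × Nat
  | [] => ([], 0)
  | c :: cs =>
    let r := pvRevGo cs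
    if c = ')' then
      if r.2 > 0 then (r.1, r.2 - 1) else (')' :: r.1, r.2)
    else if c = '(' then
      if cs.head? = some ')' then (r.1, r.2 + 1) else ('(' :: r.1, r.2)
    else (c :: r.1, r.2)

def remove_unnecessary_parentheses_v11 (text : String) : String :=
  PySem.Str.strip (String.mk (pvRevGo text.toList).1)

-- ===== PORT B =====
-- Forward scan; state = (stack of completed chunks, top first) × (current chunk).
def pvFwdGo : List Char → List (List Char) → List Char → List (List Char) × List Char
  | [], st, cur => (st, cur)
  | c :: cs, st, cur =>
    if c = ')' then pvFwdGo cs (cur :: st) []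
    else if c = '(' ∧ cs.head? = some ')' then
      match st with
      | [] => pvFwdGo cs [] cur
      | s :: st' => pvFwdGo cs st' (s ++ cur)
    else pvFwdGo cs st (cur ++ [c])

-- ')'.join of the chunks (stack is top-first).
def pvRender : List (List Char) → List Char → List Char
  | [], cur => cur
  | s :: st, cur => pvRender st (s ++ ')' :: cur)

def remove_unnecessary_parentheses_v11_alt (text : String) : String :=
  let r := pvFwdGo text.toList [] []
  PySem.Str.strip (String.mk (pvRender r.1 r.2))

-- ===== PRECONDITION & SPEC =====
def Spec_remove_unnecessary_parentheses_v11 (text : String) (out : String) : Prop := out = remove_unnecessary_parentheses_v11_alt text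
instance (text : String) (out : String) : Decidable (Spec_remove_unnecessary_parentheses_v11 text out) := by unfold Spec_remove_unnecessary_parentheses_v11; infer_instance

-- ===== CLAIM (what is proved, stated in full; the proofs are below) =====
def Claim_equal_remove_unnecessary_parentheses_v11 : Prop := ∀ (text : String), Dom_remove_unnecessary_parentheses_v11 text → Spec_remove_unnecessary_parentheses_v11 text (remove_unnecessary_parentheses_v11 text)

-- ===== LEMMAS AND PROOFS =====

-- Merging the top k pending close-parens of the forward state.
def pvMergeTop : Nat → List (List Char) → List Char → List (List Char) × List Char
  | 0, st, cur => (st, cur)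
  | _ + 1, [], cur => ([], cur)
  | k + 1, s :: st, cur => pvMergeTop k st (s ++ cur)

theorem pvRender_append (st : List (List Char)) (x y : List Char) :
    pvRender st (x ++ y) = pvRender st x ++ y := by
  induction st generalizing x with
  | nil => rfl
  | cons s st ih =>
    show pvRender st (s ++ ')' :: (x ++ y)) = _
    have : s ++ ')' :: (x ++ y) = (s ++ ')' :: x) ++ y := by simp
    rw [this, ih]
    rfl

theorem pvMergeTop_append (k : Nat) (st : List (List Char)) (x y : List Char) :
    pvMergeTop k st (x ++ y) = ((pvMergeTop k st x).1, (pvMergeTop k st x).2 ++ y) := by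
  induction k generalizing st x with
  | zero => rfl
  | succ k ih =>
    cases st with
    | nil => rfl
    | cons s st =>
      show pvMergeTop k st (s ++ (x ++ y)) = _
      rw [← List.append_assoc, ih]
      rfl

-- The bridge invariant: the final rendering of the forward scan from any state
-- equals the state with A's pending counter merged away, followed by A's kept suffix.
theorem pvBridge (cs : List Char) (st : List (List Char)) (cur : List Char) :
    pvRender (pvFwdGo cs st cur).1 (pvFwdGo cs st cur).2
      = pvRender (pvMergeTop (pvRevGo cs).2 st cur).1 (pvMergeTop (pvRevGo cs).2 st cur).2
          ++ (pvRevGo cs).1 := by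
  induction cs generalizing st cur with
  | nil => simp [pvFwdGo, pvRevGo, pvMergeTop]
  | cons c cs ih =>
    by_cases hc : c = ')'
    · subst hc
      rw [show pvFwdGo (')' :: cs) st cur = pvFwdGo cs (cur :: st) [] from rfl, ih]
      rcases h : pvRevGo cs with ⟨out, k⟩
      cases k with
      | zero =>
        simp only [pvRevGo, h, pvMergeTop]
        norm_num
        show pvRender (cur :: st) [] ++ out = pvRender st cur ++ ')' :: out
        show pvRender st (cur ++ [')']) ++ out = _
        rw [pvRender_append]; simp
      | succ k =>
        simp only [pvRevGo, h]
        norm_num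
        have : pvMergeTop (k+1) (cur :: st) [] = pvMergeTop k st cur := by
          show pvMergeTop k st (cur ++ []) = _
          simp
        rw [this]
    · by_cases ho : c = '(' ∧ cs.head? = some ')'
      · obtain ⟨ho1, ho2⟩ := ho
        subst ho1
        have hrev : pvRevGo ('(' :: cs) = ((pvRevGo cs).1, (pvRevGo cs).2 + 1) := by
          simp [pvRevGo, ho2]
        have hfwd : pvFwdGo ('(' :: cs) st cur =
            (match st with
             | [] => pvFwdGo cs [] cur
             | s :: st' => pvFwdGo cs st' (s ++ cur)) := by
          simp [pvFwdGo, ho2]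
        rw [hrev, hfwd]
        cases st with
        | nil =>
          rw [ih]
          have h1 : ∀ k, pvMergeTop k ([] : List (List Char)) cur = ([], cur) := by
            intro k; cases k <;> rfl
          rw [h1, h1]
        | cons s st' =>
          rw [ih]
          rfl
      · have hrev : pvRevGo (c :: cs) = (c :: (pvRevGo cs).1, (pvRevGo cs).2) := by
          by_cases hp : c = '('
          · subst hp
            have : cs.head? ≠ some ')' := fun h => ho ⟨rfl, h⟩
            simp [pvRevGo, this]
          · simp [pvRevGo, hc, hp]
        have hfwd : pvFwdGo (c :: cs) st cur = pvFwdGo cs st (cur ++ [c]) := by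
          simp [pvFwdGo, hc, ho]
        rw [hrev, hfwd, ih, pvMergeTop_append, pvRender_append]
        simp

-- ===== VERDICT (by name: the statement is the Claim_ definition above) =====
theorem remove_unnecessary_parentheses_v11_spec : Claim_equal_remove_unnecessary_parentheses_v11 := by
  intro text _
  show remove_unnecessary_parentheses_v11 text = remove_unnecessary_parentheses_v11_alt text
  unfold remove_unnecessary_parentheses_v11 remove_unnecessary_parentheses_v11_alt
  have h := pvBridge text.toList [] []
  have hm : ∀ k, pvMergeTop k ([] : List (List Char)) [] = ([], []) := by
    intro k; cases k <;> rfl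
  rw [hm] at h
  simp only [pvRender] at h
  simp [h]
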